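-- pv_equiv track=rewrite | github.com/hungson175/deep-research-langchain | src/agents/opp_ceo_agent_topic_generator.py | _simple_extract_strategies
-- ===== SOURCE A (Python) =====
-- from typing import List, Literal
--
-- def _simple_extract_strategies(response_content: str) -> List[str]:
--     """Simple fallback method to extract strategies from text."""
--     lines = response_content.split('\n')
--     strategies = []
--     current_strategy = []
--
--     for line in lines:
--         line_stripped = line.strip()
--         # Look for strategy boundaries
--         if line_stripped and any(line_stripped.startswith(prefix) for prefix in ['1.', '2.', '3.', '4.', '5.', '##', 'Strategy', 'Plan']):
--             if current_strategy:
--                 strategies.append('\n'.join(current_strategy))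
--                 current_strategy = []
--             current_strategy.append(line)
--         elif current_strategy:
--             current_strategy.append(line)
--
--     # Add last strategy
--     if current_strategy:
--         strategies.append('\n'.join(current_strategy))
--
--     return strategies if strategies else [response_content]
-- ===== SOURCE B (Python) =====
-- from typing import List
--
-- _PREFIXES = ['1.', '2.', '3.', '4.', '5.', '##', 'Strategy', 'Plan']
--
-- def _is_boundary(line: str) -> bool:
--     s = line.strip()
--     return bool(s) and any(s.startswith(p) for p in _PREFIXES)
--
-- def _simple_extract_strategies(response_content: str) -> List[str]:
--     """Two-phase: collect boundary-line indices, then slice blocks between them."""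
--     lines = response_content.split('\n')
--     idxs = [i for i, line in enumerate(lines) if _is_boundary(line)]
--     if not idxs:
--         return [response_content]
--     ends = idxs[1:] + [len(lines)]
--     return ['\n'.join(lines[i:j]) for i, j in zip(idxs, ends)]
-- ===== Notes on version B (the rewrite author's own statement) =====
-- stated objective: alternative
-- what changed: Replaces A's single stateful accumulator loop (current block list plus flush logic repeated at the end) by a two-phase decomposition: one pass collects the indices of boundary lines, then each block is a direct slice lines[i:j] between consecutive boundary indices joined with newlines.
import Mathlib
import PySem

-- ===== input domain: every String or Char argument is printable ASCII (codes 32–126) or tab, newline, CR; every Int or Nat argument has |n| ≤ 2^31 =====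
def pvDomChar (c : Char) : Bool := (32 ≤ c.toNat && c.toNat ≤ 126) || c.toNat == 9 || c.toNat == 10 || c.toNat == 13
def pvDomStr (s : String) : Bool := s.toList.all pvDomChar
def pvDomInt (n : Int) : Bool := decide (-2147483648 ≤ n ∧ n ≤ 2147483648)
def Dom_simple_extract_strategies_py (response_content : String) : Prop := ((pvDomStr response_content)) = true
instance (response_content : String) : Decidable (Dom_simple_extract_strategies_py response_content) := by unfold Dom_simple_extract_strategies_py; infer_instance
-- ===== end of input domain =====

-- B restructures A's stateful accumulator loop into a two-phase index-collect-then-slice decomposition; return values proved equal on all inputs (objective: alternative).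

-- ===== PORT A =====
-- Literal port of A: one fold carrying (strategies, current_strategy), flushing on each boundary line and once more at the end.
def simple_extract_strategies_py (response_content : String) : List String :=
  let lines := (PySem.Str.split? response_content "\n").getD []  -- sep "\n" ≠ "": split? is always some here
  let st := lines.foldl (fun (st : List String × List String) line =>
    let line_stripped := PySem.Str.strip line
    if line_stripped ≠ "" ∧ (["1.", "2.", "3.", "4.", "5.", "##", "Strategy", "Plan"].any fun prefix_ => PySem.Str.startswith line_stripped prefix_) then
      (if st.2 ≠ [] then (st.1 ++ [PySem.Str.join "\n" st.2], [line]) else (st.1, [line]))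
    else if st.2 ≠ [] then (st.1, st.2 ++ [line])
    else st) ([], [])
  let strategies := if st.2 ≠ [] then st.1 ++ [PySem.Str.join "\n" st.2] else st.1
  if strategies ≠ [] then strategies else [response_content]

-- ===== PORT B =====
-- helper of B: boundary-line test (Source B's _is_boundary)
def pvIsBoundary (line : String) : Bool :=
  let s := PySem.Str.strip line;
  (s != "") && (["1.", "2.", "3.", "4.", "5.", "##", "Strategy", "Plan"].any fun p => PySem.Str.startswith s p)

-- Port of B: collect boundary indices, then slice lines[i:j] between consecutive indices.
def simple_extract_strategies_py_alt (response_content : String) : List String :=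
  let lines := (PySem.Str.split? response_content "\n").getD []  -- sep "\n" ≠ "": split? is always some here
  let idxs := ((PySem.List.enumerate lines 0).filter fun il => pvIsBoundary il.2).map (·.1)
  if idxs = [] then [response_content]
  else
    let ends := idxs.tail ++ [(lines.length : Int)]
    (idxs.zip ends).map fun ij => PySem.Str.join "\n" (PySem.List.slice lines (some ij.1) (some ij.2))

-- ===== PRECONDITION & SPEC =====
def Spec_simple_extract_strategies_py (response_content : String) (out : List String) : Prop := out = simple_extract_strategies_py_alt response_content
instance (response_content : String) (out : List String) : Decidable (Spec_simple_extract_strategies_py response_content out) := by unfold Spec_simple_extract_strategies_py; infer_instance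

-- ===== CLAIM (what is proved, stated in full; the proofs are below) =====
def Claim_equal_simple_extract_strategies_py : Prop := ∀ (response_content : String), Dom_simple_extract_strategies_py response_content → Spec_simple_extract_strategies_py response_content (simple_extract_strategies_py response_content)

-- ===== LEMMAS AND PROOFS =====

-- A's loop body, named (same computation as the lambda in the port).
def pvStepA (st : List String × List String) (line : String) : List String × List String :=
  if pvIsBoundary line then
    (if st.2 ≠ [] then (st.1 ++ [PySem.Str.join "\n" st.2], [line]) else (st.1, [line]))
  else if st.2 ≠ [] then (st.1, st.2 ++ [line])
  else st

theorem pvStepA_eq : (fun (st : List String × List String) line =>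
    let line_stripped := PySem.Str.strip line
    if line_stripped ≠ "" ∧ (["1.", "2.", "3.", "4.", "5.", "##", "Strategy", "Plan"].any fun prefix_ => PySem.Str.startswith line_stripped prefix_) then
      (if st.2 ≠ [] then (st.1 ++ [PySem.Str.join "\n" st.2], [line]) else (st.1, [line]))
    else if st.2 ≠ [] then (st.1, st.2 ++ [line])
    else st) = pvStepA := by
  funext st line
  by_cases h : pvIsBoundary line
  · have h' : PySem.Str.strip line ≠ "" ∧ (["1.", "2.", "3.", "4.", "5.", "##", "Strategy", "Plan"].any fun p => PySem.Str.startswith (PySem.Str.strip line) p) = true := by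
      simpa [pvIsBoundary] using h
    simp only [pvStepA, h, if_true]
    rw [if_pos ⟨h'.1, h'.2⟩]
  · have h' : ¬ (PySem.Str.strip line ≠ "" ∧ (["1.", "2.", "3.", "4.", "5.", "##", "Strategy", "Plan"].any fun p => PySem.Str.startswith (PySem.Str.strip line) p) = true) := by
      simpa [pvIsBoundary] using h
    simp only [pvStepA, h, h', if_false, if_neg, not_false_iff, Bool.false_eq_true]

-- structural block decomposition: each block starts at a boundary line and runs to the next
def pvChunks : List String → List (List String)
  | [] => []
  | l :: ls =>
    if pvIsBoundary l then
      (l :: ls.takeWhile fun x => !pvIsBoundary x) :: pvChunks (ls.dropWhile fun x => !pvIsBoundary x)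
    else pvChunks ls
  termination_by ls => ls.length
  decreasing_by
    · have := List.length_dropWhile_le (fun x => !pvIsBoundary x) ls; simp; omega
    · simp

-- boundary indices starting at offset k
def pvIdxs (k : Nat) : List String → List Nat
  | [] => []
  | l :: ls => if pvIsBoundary l then k :: pvIdxs (k + 1) ls else pvIdxs (k + 1) ls

theorem pvEnum_eq (lines : List String) : ∀ (s : Int), 0 ≤ s →
    ((PySem.List.enumerate lines s).filter fun il => pvIsBoundary il.2).map (·.1)
      = (pvIdxs s.toNat lines).map (fun (i : Nat) => (i : Int)) := by
  induction lines with
  | nil => intro s hs; simp [PySem.List.enumerate_nil, pvIdxs]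
  | cons l ls ih =>
    intro s hs
    rw [PySem.List.enumerate_cons]
    have hsucc : (s + 1).toNat = s.toNat + 1 := by omega
    by_cases hb : pvIsBoundary l
    · simp [List.filter_cons, pvIdxs, hb, hsucc, Int.toNat_of_nonneg hs, ih (s + 1) (by omega)]
    · simp [List.filter_cons, pvIdxs, hb, hsucc, ih (s + 1) (by omega)]

def pvFin (st : List String × List String) : List String :=
  if st.2 ≠ [] then st.1 ++ [PySem.Str.join "\n" st.2] else st.1

-- A's fold, characterized by pvChunks
theorem pvFoldA (lines : List String) : ∀ (strats cur : List String),
    pvFin (lines.foldl pvStepA (strats, cur)) =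
      strats ++ (match cur with
        | [] => (pvChunks lines).map (PySem.Str.join "\n")
        | _ => PySem.Str.join "\n" (cur ++ lines.takeWhile fun x => !pvIsBoundary x)
                 :: (pvChunks (lines.dropWhile fun x => !pvIsBoundary x)).map (PySem.Str.join "\n")) := by
  induction lines with
  | nil =>
    intro strats cur
    cases cur with
    | nil => simp [pvFin, pvChunks]
    | cons c cs => simp [pvFin, pvChunks]
  | cons l ls ih =>
    intro strats cur
    by_cases hb : pvIsBoundary l
    · cases cur with
      | nil =>
        simp only [List.foldl_cons, pvStepA, hb, if_true, ne_eq, not_true_eq_false,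
          not_false_iff, if_neg]
        rw [ih strats [l]]
        conv_rhs => rw [pvChunks.eq_def]
        simp [hb]
      | cons c cs =>
        simp only [List.foldl_cons, pvStepA, hb, if_true, ne_eq, reduceCtorEq, not_false_iff, if_pos]
        rw [ih (strats ++ [PySem.Str.join "\n" (c :: cs)]) [l]]
        conv_rhs => rw [pvChunks.eq_def]
        simp [hb]
    · cases cur with
      | nil =>
        simp only [List.foldl_cons, pvStepA, hb, Bool.false_eq_true, if_false, ne_eq,
          not_true_eq_false, not_false_iff, if_neg]
        rw [ih strats []]
        conv_rhs => rw [pvChunks.eq_def]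
        simp [hb]
      | cons c cs =>
        simp only [List.foldl_cons, pvStepA, hb, Bool.false_eq_true, if_false, ne_eq, reduceCtorEq,
          not_false_iff, if_pos]
        rw [ih strats (c :: cs ++ [l])]
        simp [hb]

-- pvIdxs skips a boundary-free prefix
theorem pvIdxs_dropWhile (ls : List String) : ∀ (k : Nat),
    pvIdxs k ls = pvIdxs (k + (ls.takeWhile fun x => !pvIsBoundary x).length) (ls.dropWhile fun x => !pvIsBoundary x) := by
  induction ls with
  | nil => intro k; simp
  | cons l ls ih =>
    intro k
    by_cases hb : pvIsBoundary l
    · simp [pvIdxs, List.takeWhile_cons, List.dropWhile_cons, hb]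
    · simp only [pvIdxs, hb, Bool.false_eq_true, if_false]
      rw [ih (k + 1)]
      simp only [List.takeWhile_cons, List.dropWhile_cons, hb, Bool.not_false, if_true,
        List.length_cons]
      congr 1
      omega

def pvZipB (idxs : List Nat) (n : Nat) : List (Nat × Nat) := idxs.zip (idxs.tail ++ [n])

theorem pvZipB_cons (i : Nat) (rest : List Nat) (n : Nat) :
    pvZipB (i :: rest) n = (i, rest.headD n) :: pvZipB rest n := by
  cases rest with
  | nil => simp [pvZipB]
  | cons j r => simp [pvZipB]

theorem pvDropWhile_head {p : String → Bool} : ∀ (ls : List String) (d : String) (ds : List String), ls.dropWhile p = d :: ds → p d = false := by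
  intro ls
  induction ls with
  | nil => intro d ds h; simp [List.dropWhile] at h
  | cons x xs ih =>
    intro d ds h
    by_cases hp : p x
    · rw [List.dropWhile_cons_of_pos hp] at h
      exact ih d ds h
    · rw [List.dropWhile_cons_of_neg hp] at h
      cases h
      simpa using hp

-- B's slices between consecutive boundary indices are exactly the chunks
theorem pvSlices (lines : List String) : ∀ (k : Nat) (full : List String), full.drop k = lines →
    (pvZipB (pvIdxs k lines) full.length).map
        (fun ij => PySem.Str.join "\n" (PySem.List.slice full (some (ij.1 : Int)) (some (ij.2 : Int))))
      = (pvChunks lines).map (PySem.Str.join "\n") := by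
  induction lines using pvChunks.induct with
  | case1 =>
    intro k full h
    simp [pvIdxs, pvZipB, pvChunks]
  | case2 l ls hb ih =>
    intro k full h
    have hl : (full.drop k).length = (l :: ls).length := by rw [h]
    rw [List.length_drop, List.length_cons] at hl
    have hdrop1 : full.drop (k + 1) = ls := by
      rw [← List.drop_drop, h]
      simp
    set T := ls.takeWhile fun x => !pvIsBoundary x with hT
    set D := ls.dropWhile fun x => !pvIsBoundary x with hD
    have hTD : T ++ D = ls := List.takeWhile_append_dropWhile
    have hdropD : full.drop (k + 1 + T.length) = D := by
      rw [← List.drop_drop, hdrop1, ← hTD, List.drop_left]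
    rw [pvChunks.eq_def]
    simp only [hb, if_true]
    rw [show pvIdxs k (l :: ls) = k :: pvIdxs (k + 1) ls by simp [pvIdxs, hb]]
    rw [pvIdxs_dropWhile ls (k + 1), ← hT, ← hD]
    have hhead : (pvIdxs (k + 1 + T.length) D).headD full.length = k + 1 + T.length := by
      cases hDc : D with
      | nil =>
        have hTls : T = ls := by rw [← hTD, hDc, List.append_nil]
        have hTlen : T.length = ls.length := by rw [hTls]
        simp only [pvIdxs, List.headD_nil]
        omega
      | cons d ds =>
        have hbd : pvIsBoundary d := by
          have hh := pvDropWhile_head ls d ds (by rw [← hD, hDc])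
          simpa using hh
        simp [pvIdxs, hbd, hDc]
    rw [pvZipB_cons, List.map_cons, List.map_cons, hhead]
    have hslice : PySem.List.slice full (some (k : Int)) (some ((k + 1 + T.length : Nat) : Int)) = l :: T := by
      have hnc := PySem.List.slice_natCast full k (k + 1 + T.length)
      rw [hnc, h]
      have h1 : k + 1 + T.length - k = T.length + 1 := by omega
      rw [h1, List.take_succ_cons]
      congr 1
      rw [hT]
      exact (List.prefix_iff_eq_take.mp (List.takeWhile_prefix _)).symm
    refine congrArg₂ List.cons ?_ (ih (k + 1 + T.length) full hdropD)
    exact congrArg (PySem.Str.join "\n") hslice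
  | case3 l ls hb ih =>
    intro k full h
    have hdrop1 : full.drop (k + 1) = ls := by
      rw [← List.drop_drop, h]
      simp
    rw [pvChunks.eq_def]
    simp only [hb, Bool.false_eq_true, if_false]
    rw [show pvIdxs k (l :: ls) = pvIdxs (k + 1) ls by simp [pvIdxs, hb]]
    exact ih (k + 1) full hdrop1

-- casting the Nat-level bounds pairs to B's Int-level pairs
theorem pvZip_cast (idxs : List Nat) (n : Nat) :
    (idxs.map (fun (i : Nat) => (i : Int))).zip ((idxs.map (fun (i : Nat) => (i : Int))).tail ++ [(n : Int)])
      = (pvZipB idxs n).map (fun (p : Nat × Nat) => ((p.1 : Int), (p.2 : Int))) := by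
  have ht : (idxs.map (fun (i : Nat) => (i : Int))).tail = idxs.tail.map (fun (i : Nat) => (i : Int)) := by
    cases idxs <;> simp
  rw [ht, pvZipB]
  rw [show ((idxs.tail.map (fun (i : Nat) => (i : Int))) ++ [(n : Int)]) = (idxs.tail ++ [n]).map (fun (i : Nat) => (i : Int)) by simp]
  rw [List.zip_map]
  rfl

-- ===== VERDICT (by name: the statement is the Claim_ definition above) =====
theorem simple_extract_strategies_py_spec : Claim_equal_simple_extract_strategies_py := by
  intro rc _
  unfold Spec_simple_extract_strategies_py
  show simple_extract_strategies_py rc = simple_extract_strategies_py_alt rc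
  simp only [simple_extract_strategies_py, simple_extract_strategies_py_alt, pvStepA_eq]
  set lines := (PySem.Str.split? rc "\n").getD [] with hlines
  have hfold := pvFoldA lines [] []
  simp only [pvFin] at hfold
  rw [hfold]
  rw [pvEnum_eq lines 0 le_rfl]
  simp only [Int.toNat_zero]
  have hmain := pvSlices lines 0 lines (by simp)
  cases hI : pvIdxs 0 lines with
  | nil =>
    rw [hI] at hmain
    simp only [pvZipB, List.zip_nil_left, List.map_nil] at hmain
    simp [← hmain]
  | cons i rest =>
    rw [hI] at hmain
    have hne : ((i :: rest).map (fun (i : Nat) => (i : Int))) ≠ [] := by simp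
    rw [if_neg hne]
    rw [pvZip_cast (i :: rest) lines.length]
    rw [List.map_map]
    rw [show ((fun ij => PySem.Str.join "\n" (PySem.List.slice lines (some ij.1) (some ij.2))) ∘ (fun (p : Nat × Nat) => ((p.1 : Int), (p.2 : Int)))) = (fun (ij : Nat × Nat) => PySem.Str.join "\n" (PySem.List.slice lines (some (ij.1 : Int)) (some (ij.2 : Int)))) from rfl]
    rw [hmain]
    have hMne : (pvChunks lines).map (PySem.Str.join "\n") ≠ [] := by
      rw [← hmain]; simp [pvZipB_cons]
    simp [hMne]
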